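-- pv_equiv track=rewrite | github.com/DanRei12/TP-y-Clases---AED---UTN | pyDan/Parcial2ejemploconfunciones.py | Punto1
-- ===== SOURCE A (Python) =====
-- def Punto1(texto):
--     cant_r = band_car = False
--     pal_mas_1_digito = 0
--     for letra in texto:
--         #Punto 1
--         if letra == "r":
--             cant_r = True
--         elif letra == " " or letra == "." or letra == ",":
--             cant_r = False
--
--         if letra == "1" or letra == "2" or letra == "3" or letra == "4" or letra == "5" or letra == "6" or letra == "7" or letra == "8" or letra == "9" or letra == "0":
--             band_car = True
--         elif letra == " " or letra == "." or letra == ",":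
--             band_car = False
--
--         if cant_r and band_car:
--             pal_mas_1_digito += 1
--             band_car = False
--             cant_r = False
--     return pal_mas_1_digito
-- ===== SOURCE B (Python) =====
-- def Punto1(texto):
--     # tokenize first on the delimiters ' ', '.', ',' then count r+digit pairs per word
--     palabras = []
--     actual = []
--     for c in texto:
--         if c == " " or c == "." or c == ",":
--             palabras.append(actual)
--             actual = []
--         else:
--             actual.append(c)
--     palabras.append(actual)
--     total = 0
--     for palabra in palabras:
--         vi_r = vi_digito = False
--         for c in palabra:
--             if c == "r":
--                 vi_r = True
--             elif c.isdigit():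
--                 vi_digito = True
--             if vi_r and vi_digito:
--                 total += 1
--                 vi_r = vi_digito = False
--     return total
-- ===== Notes on version B (the rewrite author's own statement) =====
-- stated objective: alternative
-- what changed: A's single pass with delimiter-reset flags is replaced by a two-phase decomposition: first tokenize the text into words on the delimiters ' ', '.', ',' (keeping empty segments), then count greedy r+digit pairs inside each word with fresh flags.
import Mathlib
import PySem

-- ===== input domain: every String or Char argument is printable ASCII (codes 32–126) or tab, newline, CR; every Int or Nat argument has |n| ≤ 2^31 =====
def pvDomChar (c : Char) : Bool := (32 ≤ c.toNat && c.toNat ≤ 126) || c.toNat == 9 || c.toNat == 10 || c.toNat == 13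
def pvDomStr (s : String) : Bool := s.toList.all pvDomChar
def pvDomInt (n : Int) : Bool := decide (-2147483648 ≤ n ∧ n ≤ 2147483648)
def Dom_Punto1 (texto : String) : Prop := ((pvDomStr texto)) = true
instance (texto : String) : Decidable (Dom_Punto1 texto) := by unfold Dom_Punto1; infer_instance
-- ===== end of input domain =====

-- B tokenizes the text on the delimiters ' ', '.', ',' first and then counts r+digit pairs word by
-- word, replacing A's single flag-reset-on-delimiter pass (objective: alternative decomposition).

-- ===== PORT A =====
-- one iteration of A's loop body over the state (cant_r, band_car, pal_mas_1_digito)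
def pvAStep (st : Bool × Bool × Int) (letra : Char) : Bool × Bool × Int :=
  let cant_r := if letra = 'r' then true
    else if letra = ' ' ∨ letra = '.' ∨ letra = ',' then false else st.1
  let band_car := if letra = '1' ∨ letra = '2' ∨ letra = '3' ∨ letra = '4' ∨ letra = '5' ∨
      letra = '6' ∨ letra = '7' ∨ letra = '8' ∨ letra = '9' ∨ letra = '0' then true
    else if letra = ' ' ∨ letra = '.' ∨ letra = ',' then false else st.2.1
  if cant_r && band_car then (false, false, st.2.2 + 1) else (cant_r, band_car, st.2.2)

def Punto1 (texto : String) : Int :=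
  (texto.toList.foldl pvAStep (false, false, 0)).2.2

-- ===== PORT B =====
-- Source B's first loop: build the word list (palabras, actual are the two accumulators)
def pvBSplit : List Char → List (List Char) → List Char → List (List Char)
  | [], palabras, actual => palabras ++ [actual]
  | c :: rest, palabras, actual =>
      if c = ' ' ∨ c = '.' ∨ c = ',' then pvBSplit rest (palabras ++ [actual]) []
      else pvBSplit rest palabras (actual ++ [c])

-- Source B's inner loop body over (vi_r, vi_digito, total)
def pvBStep (st : Bool × Bool × Int) (c : Char) : Bool × Bool × Int :=
  let st' := if c = 'r' then (true, st.2.1, st.2.2)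
    else if PySem.Chars.isdigit c then (st.1, true, st.2.2)
    else st
  if st'.1 && st'.2.1 then (false, false, st'.2.2 + 1) else st'

-- Source B's middle loop body: process one word with fresh flags, threading total
def pvBWord (total : Int) (palabra : List Char) : Int :=
  (palabra.foldl pvBStep (false, false, total)).2.2

def Punto1_alt (texto : String) : Int :=
  (pvBSplit texto.toList [] []).foldl pvBWord 0

-- ===== PRECONDITION & SPEC =====
def Spec_Punto1 (texto : String) (out : Int) : Prop := out = Punto1_alt texto
instance (texto : String) (out : Int) : Decidable (Spec_Punto1 texto out) := by unfold Spec_Punto1; infer_instance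

-- ===== CLAIM (what is proved, stated in full; the proofs are below) =====
def Claim_equal_Punto1 : Prop := ∀ (texto : String), Dom_Punto1 texto → Spec_Punto1 texto (Punto1 texto)

-- ===== LEMMAS AND PROOFS =====

-- proof-side splitter without the `palabras` accumulator
def pvSplit : List Char → List Char → List (List Char)
  | [], actual => [actual]
  | c :: rest, actual =>
      if c = ' ' ∨ c = '.' ∨ c = ',' then actual :: pvSplit rest []
      else pvSplit rest (actual ++ [c])

theorem pvBSplit_eq : ∀ (l : List Char) (ws : List (List Char)) (cur : List Char),
    pvBSplit l ws cur = ws ++ pvSplit l cur := by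
  intro l
  induction l with
  | nil => intro ws cur; rfl
  | cons c rest ih =>
      intro ws cur
      by_cases h : c = ' ' ∨ c = '.' ∨ c = ','
      · simp [pvBSplit, pvSplit, h, ih]
      · simp [pvBSplit, pvSplit, h, ih]

theorem pvSplit_shift : ∀ (l : List Char) (cur : List Char),
    pvSplit l cur = (cur ++ (pvSplit l []).headI) :: (pvSplit l []).tail := by
  intro l
  induction l with
  | nil => intro cur; simp [pvSplit]
  | cons c rest ih =>
      intro cur
      by_cases h : c = ' ' ∨ c = '.' ∨ c = ','
      · simp [pvSplit, h]
      · simp only [pvSplit, if_neg h, List.nil_append]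
        rw [ih (cur ++ [c]), ih [c]]
        simp

-- the count component of B's inner fold is additive in the starting total
theorem pvBStep_shift (r d : Bool) (t : Int) (c : Char) :
    pvBStep (r, d, t) c =
      ((pvBStep (r, d, 0) c).1, (pvBStep (r, d, 0) c).2.1, t + (pvBStep (r, d, 0) c).2.2) := by
  simp only [pvBStep]
  split_ifs <;> simp

theorem pvBFold_shift : ∀ (w : List Char) (r d : Bool) (t : Int),
    w.foldl pvBStep (r, d, t) =
      ((w.foldl pvBStep (r, d, 0)).1, (w.foldl pvBStep (r, d, 0)).2.1,
        t + (w.foldl pvBStep (r, d, 0)).2.2) := by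
  intro w
  induction w with
  | nil => intro r d t; simp
  | cons c rest ih =>
      intro r d t
      simp only [List.foldl_cons]
      rw [pvBStep_shift]
      rw [ih (pvBStep (r, d, 0) c).1 (pvBStep (r, d, 0) c).2.1 (t + (pvBStep (r, d, 0) c).2.2),
          ih (pvBStep (r, d, 0) c).1 (pvBStep (r, d, 0) c).2.1 (pvBStep (r, d, 0) c).2.2]
      simp only [Prod.mk.injEq, true_and]
      omega

-- counting scheme B performs on a word list: first word starts with flags (r, d), the rest fresh
def pvBGo : List (List Char) → Bool → Bool → Int
  | [], _, _ => 0
  | w :: ws, r, d => (w.foldl pvBStep (r, d, 0)).2.2 + pvBGo ws false false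

theorem pvFoldl_bWord : ∀ (ws : List (List Char)) (t : Int),
    ws.foldl pvBWord t = t + pvBGo ws false false := by
  intro ws
  induction ws with
  | nil => intro t; simp [pvBGo]
  | cons w rest ih =>
      intro t
      simp only [List.foldl_cons, pvBGo]
      rw [ih]
      have : pvBWord t w = t + (w.foldl pvBStep (false, false, 0)).2.2 := by
        simp only [pvBWord]; rw [pvBFold_shift]
      rw [this]; omega

theorem pv_isdigit_iff (c : Char) : PySem.Chars.isdigit c = true ↔
    (c = '1' ∨ c = '2' ∨ c = '3' ∨ c = '4' ∨ c = '5' ∨ c = '6' ∨ c = '7' ∨ c = '8' ∨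
      c = '9' ∨ c = '0') := by
  have h0 : '0'.val.toNat = 48 := rfl
  have h1 : '1'.val.toNat = 49 := rfl
  have h2 : '2'.val.toNat = 50 := rfl
  have h3 : '3'.val.toNat = 51 := rfl
  have h4 : '4'.val.toNat = 52 := rfl
  have h5 : '5'.val.toNat = 53 := rfl
  have h6 : '6'.val.toNat = 54 := rfl
  have h7 : '7'.val.toNat = 55 := rfl
  have h8 : '8'.val.toNat = 56 := rfl
  have h9 : '9'.val.toNat = 57 := rfl
  simp only [PySem.Chars.isdigit, Bool.and_eq_true, decide_eq_true_eq, Char.le_def, Char.ext_iff,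
    UInt32.le_iff_toNat_le, UInt32.ext_iff]
  omega

-- on a non-delimiter character A's loop body and B's inner loop body agree
theorem pvStep_agree (c : Char) (h : ¬(c = ' ' ∨ c = '.' ∨ c = ',')) (r d : Bool) (t : Int) :
    pvAStep (r, d, t) c = pvBStep (r, d, t) c := by
  by_cases hr : c = 'r'
  · have hd : ¬(c = '1' ∨ c = '2' ∨ c = '3' ∨ c = '4' ∨ c = '5' ∨ c = '6' ∨ c = '7' ∨ c = '8' ∨
        c = '9' ∨ c = '0') := by subst hr; simp
    simp [pvAStep, pvBStep, hr]
  · by_cases hd : c = '1' ∨ c = '2' ∨ c = '3' ∨ c = '4' ∨ c = '5' ∨ c = '6' ∨ c = '7' ∨ c = '8' ∨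
        c = '9' ∨ c = '0'
    · have hdig : PySem.Chars.isdigit c = true := (pv_isdigit_iff c).mpr hd
      simp [pvAStep, pvBStep, hr, hd, h, hdig]
    · have hdig : PySem.Chars.isdigit c = false := by
        rw [Bool.eq_false_iff]
        intro hc; exact hd ((pv_isdigit_iff c).mp hc)
      simp [pvAStep, pvBStep, hr, hd, h, hdig]

theorem pvMain : ∀ (l : List Char) (r d : Bool) (t : Int),
    (l.foldl pvAStep (r, d, t)).2.2 = t + pvBGo (pvSplit l []) r d := by
  intro l
  induction l with
  | nil => intro r d t; simp [pvSplit, pvBGo]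
  | cons c rest ih =>
      intro r d t
      by_cases h : c = ' ' ∨ c = '.' ∨ c = ','
      · have hr : c ≠ 'r' := by rcases h with h | h | h <;> subst h <;> decide
        have hd : ¬(c = '1' ∨ c = '2' ∨ c = '3' ∨ c = '4' ∨ c = '5' ∨ c = '6' ∨ c = '7' ∨
            c = '8' ∨ c = '9' ∨ c = '0') := by
          rcases h with h | h | h <;> subst h <;> decide
        have hstep : pvAStep (r, d, t) c = (false, false, t) := by
          simp [pvAStep, hr, hd, h]
        simp only [List.foldl_cons, hstep, pvSplit, if_pos h, pvBGo]
        rw [ih]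
        simp
      · -- non-delimiter: the head char joins the first word of the split
        have hsp := pvSplit_shift rest []
        simp only [List.nil_append] at hsp
        obtain ⟨w, ws, hws⟩ : ∃ w ws, pvSplit rest [] = w :: ws := ⟨_, _, hsp⟩
        have hsplit : pvSplit (c :: rest) [] = (c :: w) :: ws := by
          simp only [pvSplit, if_neg h, List.nil_append]
          rw [pvSplit_shift rest [c], hws]
          simp
        rcases hX : pvBStep (r, d, 0) c with ⟨r', d', i⟩
        have hstep : pvBStep (r, d, t) c = (r', d', t + i) := by rw [pvBStep_shift, hX]
        simp only [List.foldl_cons]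
        rw [pvStep_agree c h r d t, hstep, ih, hws, hsplit]
        simp only [pvBGo, List.foldl_cons, hX]
        rw [pvBFold_shift w r' d' i]
        simp only
        omega

-- ===== VERDICT (by name: the statement is the Claim_ definition above) =====
theorem Punto1_spec : Claim_equal_Punto1 := by
  intro texto _
  unfold Spec_Punto1 Punto1 Punto1_alt
  rw [pvBSplit_eq, pvFoldl_bWord, pvMain]
  simp
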